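-- pv_equiv track=rewrite | github.com/ahrussell/costanza | experiments/chatml/chatml_prompt_builder.py | render_system_message
-- ===== SOURCE A (Python) =====
-- _SYSTEM_TRAILER_TO_DROP = "Sample diaries follow"
--
-- def render_system_message(system_prompt_text: str) -> str:
--     """Strip the trailing 'Sample diaries follow' line from system.txt."""
--     lines = system_prompt_text.splitlines()
--     out = []
--     for line in lines:
--         if _SYSTEM_TRAILER_TO_DROP.lower() in line.lower():
--             # Drop this line and any blank lines immediately before it.
--             while out and not out[-1].strip():
--                 out.pop()
--             continue
--         out.append(line)
--     return "\n".join(out).rstrip()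
-- ===== SOURCE B (Python) =====
-- _SYSTEM_TRAILER_TO_DROP = "Sample diaries follow"
--
-- def render_system_message(system_prompt_text: str) -> str:
--     marker = _SYSTEM_TRAILER_TO_DROP.lower()
--     out = []
--     pending = []  # consecutive blank lines not yet committed
--     for line in system_prompt_text.splitlines():
--         if marker in line.lower():
--             pending.clear()
--         elif line.strip() == '':
--             pending.append(line)
--         else:
--             out.extend(pending)
--             pending.clear()
--             out.append(line)
--     out.extend(pending)
--     return "\n".join(out).rstrip()
-- ===== Notes on version B (the rewrite author's own statement) =====
-- stated objective: alternative
-- what changed: B buffers consecutive blank lines in a pending list and commits them only when a real line follows (clearing the buffer at a marker line), instead of A's append-everything-then-pop-trailing-blanks-at-each-marker; same single pass, different maintained state.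
import Mathlib
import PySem

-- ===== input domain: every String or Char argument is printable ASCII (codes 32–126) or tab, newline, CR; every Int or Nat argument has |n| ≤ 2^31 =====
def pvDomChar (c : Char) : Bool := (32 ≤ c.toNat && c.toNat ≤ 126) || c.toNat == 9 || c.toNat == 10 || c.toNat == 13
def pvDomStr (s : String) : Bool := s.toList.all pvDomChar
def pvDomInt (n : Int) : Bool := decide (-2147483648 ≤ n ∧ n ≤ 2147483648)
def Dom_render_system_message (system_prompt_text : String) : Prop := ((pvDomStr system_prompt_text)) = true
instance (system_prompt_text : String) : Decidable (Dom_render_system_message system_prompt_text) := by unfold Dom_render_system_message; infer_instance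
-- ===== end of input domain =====

-- B buffers consecutive blank lines and commits them only when a real line follows,
-- instead of A's append-then-pop at each marker line; same cost, different decomposition.

-- ===== PORT A =====
def pvTrailer : String := "Sample diaries follow"

-- A's inner `while out and not out[-1].strip(): out.pop()` loop
def pvDropTrail (out : List String) : List String :=
  if h : out = [] then out
  else if PySem.Str.strip (out.getLast h) == "" then pvDropTrail out.dropLast
  else out
termination_by out.length
decreasing_by
  have := List.length_pos_of_ne_nil h
  simp [List.length_dropLast]; omega

def render_system_message (system_prompt_text : String) : String :=
  let lines := PySem.Str.splitlines system_prompt_text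
  let out := lines.foldl (fun out line =>
    if PySem.Str.isIn (PySem.Str.lower pvTrailer) (PySem.Str.lower line) then
      pvDropTrail out
    else out ++ [line]) []
  PySem.Str.rstrip (PySem.Str.join "\n" out)

-- ===== PORT B =====
-- state: (committed output, pending run of blank lines)
def pvStepB (st : List String × List String) (line : String) : List String × List String :=
  if PySem.Str.isIn (PySem.Str.lower pvTrailer) (PySem.Str.lower line) then (st.1, [])
  else if PySem.Str.strip line == "" then (st.1, st.2 ++ [line])
  else (st.1 ++ st.2 ++ [line], [])

def render_system_message_alt (system_prompt_text : String) : String :=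
  let st := (PySem.Str.splitlines system_prompt_text).foldl pvStepB ([], [])
  PySem.Str.rstrip (PySem.Str.join "\n" (st.1 ++ st.2))

-- ===== PRECONDITION & SPEC =====
def Spec_render_system_message (system_prompt_text : String) (out : String) : Prop := out = render_system_message_alt system_prompt_text
instance (system_prompt_text : String) (out : String) : Decidable (Spec_render_system_message system_prompt_text out) := by unfold Spec_render_system_message; infer_instance

-- ===== CLAIM (what is proved, stated in full; the proofs are below) =====
def Claim_equal_render_system_message : Prop := ∀ (system_prompt_text : String), Dom_render_system_message system_prompt_text → Spec_render_system_message system_prompt_text (render_system_message system_prompt_text)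

-- ===== LEMMAS AND PROOFS =====

-- the loop invariant relating A's single list to B's (committed, pending) pair
def pvNice (b : List String) : Prop :=
  b = [] ∨ ∃ h : b ≠ [], (PySem.Str.strip (b.getLast h) == "") = false

def pvInv (out : List String) (st : List String × List String) : Prop :=
  out = st.1 ++ st.2 ∧ (∀ x ∈ st.2, (PySem.Str.strip x == "") = true) ∧ pvNice st.1

lemma pvDropTrail_nice (b : List String) (hb : pvNice b) : pvDropTrail b = b := by
  rcases hb with rfl | ⟨h, hl⟩
  · simp [pvDropTrail]
  · rw [pvDropTrail]
    simp [h, hl]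

lemma pvDropTrail_append_blanks (p : List String)
    (hp : ∀ x ∈ p, (PySem.Str.strip x == "") = true) (b : List String) (hb : pvNice b) :
    pvDropTrail (b ++ p) = b := by
  induction p using List.reverseRecOn with
  | nil => simpa using pvDropTrail_nice b hb
  | append_singleton q x ih =>
    have hx : (PySem.Str.strip x == "") = true := hp x (by simp)
    have hne : b ++ (q ++ [x]) ≠ [] := by simp
    rw [pvDropTrail]
    rw [dif_neg hne]
    have hlast : (b ++ (q ++ [x])).getLast hne = x := by
      simp
    rw [hlast, if_pos hx]
    have : (b ++ (q ++ [x])).dropLast = b ++ q := by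
      rw [← List.append_assoc]
      simp
    rw [this]
    exact ih (fun y hy => hp y (by simp [hy]))

lemma pvInv_step (out : List String) (st : List String × List String) (line : String)
    (h : pvInv out st) :
    pvInv ((fun out line =>
      if PySem.Str.isIn (PySem.Str.lower pvTrailer) (PySem.Str.lower line) then
        pvDropTrail out
      else out ++ [line]) out line) (pvStepB st line) := by
  obtain ⟨heq, hp, hb'⟩ := h
  by_cases hm : PySem.Str.isIn (PySem.Str.lower pvTrailer) (PySem.Str.lower line) = true
  · have hres : pvStepB st line = (st.1, []) := by unfold pvStepB; rw [if_pos hm]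
    rw [hres]
    simp only [hm, if_true]
    exact ⟨by rw [heq]; simpa using pvDropTrail_append_blanks st.2 hp st.1 hb', by simp, hb'⟩
  · by_cases hblank : (PySem.Str.strip line == "") = true
    · have hres : pvStepB st line = (st.1, st.2 ++ [line]) := by
        unfold pvStepB; rw [if_neg hm, if_pos hblank]
      rw [hres]
      simp only [hm]
      refine ⟨by simp [heq], ?_, hb'⟩
      intro x hx
      rcases List.mem_append.mp hx with h1 | h1
      · exact hp x h1
      · rw [List.mem_singleton.mp h1]; exact hblank
    · have hres : pvStepB st line = (st.1 ++ st.2 ++ [line], []) := by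
        unfold pvStepB; rw [if_neg hm, if_neg hblank]
      rw [hres]
      simp only [hm]
      refine ⟨by simp [heq], by simp, Or.inr ⟨by simp, ?_⟩⟩
      have hlast : (st.1 ++ st.2 ++ [line]).getLast (by simp) = line := by
        simp
      rw [hlast]
      simpa using hblank

lemma pvFold_inv (lines : List String) (out : List String) (st : List String × List String)
    (h : pvInv out st) :
    pvInv (lines.foldl (fun out line =>
      if PySem.Str.isIn (PySem.Str.lower pvTrailer) (PySem.Str.lower line) then
        pvDropTrail out
      else out ++ [line]) out) (lines.foldl pvStepB st) := by
  induction lines generalizing out st with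
  | nil => exact h
  | cons l ls ih => exact ih _ _ (pvInv_step out st l h)

-- ===== VERDICT (by name: the statement is the Claim_ definition above) =====
theorem render_system_message_spec : Claim_equal_render_system_message := by
  intro s _
  have h := pvFold_inv (PySem.Str.splitlines s) [] ([], []) ⟨by simp, by simp, Or.inl rfl⟩
  unfold Spec_render_system_message
  simp only [render_system_message, render_system_message_alt]
  rw [h.1]
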